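-- pv_equiv track=rewrite | github.com/Fondamenti18/fondamenti-di-programmazione | students/1814543/homework01/program03.py | costruisciDizionario
-- ===== SOURCE A (Python) =====
-- def costruisciDizionario(chiave):
--     chiaveOrdinata=[]
--     chiaveDisordinata=[]
--     for C in reversed(chiave):
--         if(C<'a' or C>'z'):
--             continue
--         else:
--             if C not in chiaveDisordinata:
--                 chiaveDisordinata.append(C)
--     chiaveDisordinata.reverse()
--     chiaveOrdinata = sorted(chiaveDisordinata)
--     dizChiave = {}
--
--     for keyOrd, keyDisord in zip(chiaveOrdinata, chiaveDisordinata):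
--         dizChiave[keyOrd] = keyDisord
--
--     return dizChiave
-- ===== SOURCE B (Python) =====
-- def costruisciDizionario(chiave):
--     # Insertion-ordered dict: delete-then-reinsert keeps keys ordered by LAST occurrence.
--     d = {}
--     for c in chiave:
--         if 'a' <= c <= 'z':
--             d.pop(c, None)
--             d[c] = None
--     disord = list(d)
--     return {k: v for k, v in zip(sorted(disord), disord)}
-- ===== Notes on version B (the rewrite author's own statement) =====
-- stated objective: idiomatic
-- what changed: Replaces A's reversed-scan with list-membership dedup plus a final list reversal by a single forward pass over the string using an insertion-ordered dict with delete-then-reinsert, whose key order is the same last-occurrence order.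
import Mathlib
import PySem

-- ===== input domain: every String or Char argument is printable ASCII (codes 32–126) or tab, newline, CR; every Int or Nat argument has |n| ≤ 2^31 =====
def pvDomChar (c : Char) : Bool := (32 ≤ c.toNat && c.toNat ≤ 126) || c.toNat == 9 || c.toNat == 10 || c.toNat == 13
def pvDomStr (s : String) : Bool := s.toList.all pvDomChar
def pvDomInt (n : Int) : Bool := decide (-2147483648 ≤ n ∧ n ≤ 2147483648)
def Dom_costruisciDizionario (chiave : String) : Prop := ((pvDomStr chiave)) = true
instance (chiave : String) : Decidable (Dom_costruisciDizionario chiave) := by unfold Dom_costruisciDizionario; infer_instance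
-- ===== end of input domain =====

-- B replaces A's reversed-scan + list-membership dedup + final reversal by one forward pass over the
-- string through an insertion-ordered dict with delete-then-reinsert (idiomatic; same result).

-- ===== PORT A =====
-- A's loop body over reversed(chiave): skip non-lowercase, append first-seen chars.
def pvAStep (acc : List Char) (C : Char) : List Char :=
  if C < 'a' ∨ 'z' < C then acc
  else if C ∈ acc then acc else acc ++ [C]

def costruisciDizionario (chiave : String) : List (String × String) :=
  let chiaveDisordinata := chiave.toList.reverse.foldl pvAStep []
  let chiaveDisordinata := chiaveDisordinata.reverse
  let chiaveOrdinata := PySem.List.sorted chiaveDisordinata (fun x => x) false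
  -- Python chars are 1-char strings; sorting Chars equals sorting their 1-char strings on ASCII.
  ((List.zip chiaveOrdinata chiaveDisordinata).foldl
      (fun d p => PySem.Dict.insert d (String.mk [p.1]) (String.mk [p.2]))
      PySem.Dict.empty).items

-- ===== PORT B =====
-- Source B's loop body: d.pop(c, None); d[c] = None  →  erase then insert (insert appends: key absent).
def pvBStep (d : PySem.Dict Char Unit) (c : Char) : PySem.Dict Char Unit :=
  if 'a' ≤ c ∧ c ≤ 'z' then PySem.Dict.insert (PySem.Dict.erase d c) c () else d

def costruisciDizionario_alt (chiave : String) : List (String × String) :=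
  let d := chiave.toList.foldl pvBStep PySem.Dict.empty
  let disord := PySem.Dict.keys d
  ((List.zip (PySem.List.sorted disord (fun x => x) false) disord).foldl
      (fun acc p => PySem.Dict.insert acc (String.mk [p.1]) (String.mk [p.2]))
      PySem.Dict.empty).items

-- ===== PRECONDITION & SPEC =====
def Spec_costruisciDizionario (chiave : String) (out : List (String × String)) : Prop := out = costruisciDizionario_alt chiave
instance (chiave : String) (out : List (String × String)) : Decidable (Spec_costruisciDizionario chiave out) := by unfold Spec_costruisciDizionario; infer_instance

-- ===== CLAIM (what is proved, stated in full; the proofs are below) =====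
def Claim_equal_costruisciDizionario : Prop := ∀ (chiave : String), Dom_costruisciDizionario chiave → Spec_costruisciDizionario chiave (costruisciDizionario chiave)

-- ===== LEMMAS AND PROOFS =====

-- proof-side characterization of one B step on the key list
def pvGStep (acc : List Char) (c : Char) : List Char :=
  if 'a' ≤ c ∧ c ≤ 'z' then acc.filter (fun x => decide (x ≠ c)) ++ [c] else acc

theorem pvKeys_bstep (d : PySem.Dict Char Unit) (c : Char) :
    (pvBStep d c).keys = pvGStep d.keys c := by
  unfold pvBStep pvGStep
  split_ifs with h
  · have hcongr : List.filter (fun p : Char × Unit => !p.1 == c) d.items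
        = List.filter (fun x : Char × Unit => !decide (x.1 = c)) d.items :=
      List.filter_congr (fun x _ => by simp [beq_eq_decide])
    simp [PySem.Dict.insert, PySem.Dict.erase, PySem.Dict.contains, PySem.Dict.keys,
      List.filter_map, Function.comp_def, List.any_filter, hcongr]
  · rfl

theorem pvKeys_bfold (xs : List Char) (d : PySem.Dict Char Unit) :
    (xs.foldl pvBStep d).keys = xs.foldl pvGStep d.keys := by
  induction xs generalizing d with
  | nil => rfl
  | cons x xs ih => simp [List.foldl, ih, pvKeys_bstep]

theorem pvAfold_acc (ys : List Char) (acc : List Char) :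
    ys.foldl pvAStep acc = acc ++ (ys.foldl pvAStep []).filter (fun x => decide (x ∉ acc)) := by
  induction ys generalizing acc with
  | nil => simp
  | cons y ys ih =>
    simp only [List.foldl_cons]
    rw [ih (pvAStep acc y), ih (pvAStep [] y)]
    by_cases hl : y < 'a' ∨ 'z' < y
    · have e1 : pvAStep acc y = acc := by simp [pvAStep, hl]
      have e2 : pvAStep [] y = [] := by simp [pvAStep, hl]
      rw [e1, e2]
      simp
    · have e2 : pvAStep [] y = [y] := by simp [pvAStep, hl]
      by_cases hm : y ∈ acc
      · have e1 : pvAStep acc y = acc := by simp [pvAStep, hl, hm]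
        rw [e1, e2]
        simp only [List.filter_append, List.filter_filter, List.append_assoc]
        congr 1
        rw [List.filter_cons, List.filter_nil]
        have : (decide (y ∉ acc)) = false := by simp [hm]
        rw [if_neg (by simp [hm])]
        simp only [List.nil_append]
        apply List.filter_congr
        intro x hx
        by_cases hxy : x = y
        · subst hxy; simp [hm]
        · simp [hxy]
      · have e1 : pvAStep acc y = acc ++ [y] := by simp [pvAStep, hl, hm]
        rw [e1, e2]
        simp only [List.filter_append, List.filter_filter, List.append_assoc]
        rw [List.filter_cons, List.filter_nil]
        rw [if_pos (by simp [hm])]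
        congr 1
        congr 1
        apply List.filter_congr
        intro x hx
        by_cases hxy : x = y
        · subst hxy; simp
        · simp [hxy, List.mem_append]

theorem pvMain (xs : List Char) :
    (xs.reverse.foldl pvAStep []).reverse = xs.foldl pvGStep [] := by
  induction xs using List.reverseRecOn with
  | nil => rfl
  | append_singleton ys c ih =>
    have hr : List.foldl pvGStep [] (ys ++ [c]) = pvGStep (List.foldl pvGStep [] ys) c := by
      rw [List.foldl_append]; rfl
    rw [hr, List.reverse_append]
    simp only [List.reverse_cons, List.reverse_nil, List.nil_append, List.singleton_append,
      List.foldl_cons]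
    rw [pvAfold_acc ys.reverse (pvAStep [] c)]
    by_cases hl : c < 'a' ∨ 'z' < c
    · have e : pvAStep [] c = [] := by simp [pvAStep, hl]
      rw [e]
      simp only [List.nil_append]
      rw [pvGStep, if_neg (fun hc => hl.elim (fun h => absurd hc.1 (not_le.mpr h))
        (fun h => absurd hc.2 (not_le.mpr h)))]
      rw [← ih]
      simp
    · have e : pvAStep [] c = [c] := by simp [pvAStep, hl]
      rw [e]
      simp only [List.singleton_append, List.reverse_cons]
      rw [pvGStep, if_pos ⟨not_lt.mp (fun h => hl (Or.inl h)), not_lt.mp (fun h => hl (Or.inr h))⟩]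
      rw [← ih, ← List.filter_reverse]
      have hfc : List.filter (fun x => decide (x ∉ [c])) (List.foldl pvAStep [] ys.reverse).reverse
          = List.filter (fun x => decide (x ≠ c)) (List.foldl pvAStep [] ys.reverse).reverse := by
        apply List.filter_congr
        intro x hx; simp
      rw [hfc]

-- ===== VERDICT (by name: the statement is the Claim_ definition above) =====
theorem costruisciDizionario_spec : Claim_equal_costruisciDizionario := by
  intro chiave _
  unfold Spec_costruisciDizionario costruisciDizionario costruisciDizionario_alt
  simp only [pvKeys_bfold, PySem.Dict.keys_empty, pvMain]
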